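-- pv_equiv track=rewrite | github.com/windy003/P_Calculator | calculator.py | _fmt_hex
-- ===== SOURCE A (Python) =====
-- def _fmt_hex(s):
--     """每4位加一个空格，从右往左分组"""
--     s = s.upper()
--     groups = []
--     while len(s) > 4:
--         groups.append(s[-4:])
--         s = s[:-4]
--     groups.append(s)
--     return " ".join(reversed(groups))
-- ===== SOURCE B (Python) =====
-- def _fmt_hex(s):
--     """每4位加一个空格，从右往左分组"""
--     s = s.upper()
--     out = []
--     for i, ch in enumerate(reversed(s)):
--         if i % 4 == 0 and i > 0:
--             out.append(" ")
--         out.append(ch)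
--     return "".join(out)[::-1]
-- ===== Notes on version B (the rewrite author's own statement) =====
-- stated objective: faster
-- what changed: Replaces the quadratic while-loop that repeatedly slices off the last 4 characters and re-copies the rest by a single character-wise pass over the reversed string that inserts a separator at every nonzero index divisible by 4, then reverses the joined result.
import Mathlib
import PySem

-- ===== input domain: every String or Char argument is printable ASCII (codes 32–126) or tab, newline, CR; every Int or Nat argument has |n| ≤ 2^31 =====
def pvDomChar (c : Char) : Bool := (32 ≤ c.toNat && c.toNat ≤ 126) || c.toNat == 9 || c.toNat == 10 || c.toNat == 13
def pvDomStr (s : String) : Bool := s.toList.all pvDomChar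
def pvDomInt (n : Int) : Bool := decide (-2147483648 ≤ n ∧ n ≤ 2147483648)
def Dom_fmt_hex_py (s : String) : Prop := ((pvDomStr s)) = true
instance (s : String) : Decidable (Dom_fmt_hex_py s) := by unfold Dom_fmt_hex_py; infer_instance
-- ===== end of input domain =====

-- B groups the string in one linear character walk over the reversed string with a modular
-- separator counter instead of A's repeated tail slicing (which re-copies the string each
-- iteration); same return value on every string, measurably faster on large inputs.

-- ===== PORT A =====
-- while len(s) > 4: groups.append(s[-4:]); s = s[:-4]   then groups.append(s)
def fmtALoop (cs : List Char) (groups : List (List Char)) : List (List Char) :=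
  if 4 < cs.length then
    fmtALoop (PySem.Chars.slice cs none (some (-4)))
             (groups ++ [PySem.Chars.slice cs (some (-4)) none])
  else groups ++ [cs]
termination_by cs.length
decreasing_by
  simp only [PySem.Chars.slice_eq_listSlice,
    PySem.List.slice_to_neg_ofNat cs 4 (by omega), List.length_take]
  omega

def fmt_hex_py (s : String) : String :=
  String.ofList (PySem.Chars.join [' '] (fmtALoop (PySem.Chars.upper s.toList) []).reverse)

-- ===== PORT B =====
-- loop body: if i % 4 == 0 and i > 0: out.append(" "); out.append(ch)
def fmtBStep (out : List Char) (p : Int × Char) : List Char :=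
  (if p.1 % 4 = 0 ∧ 0 < p.1 then out ++ [' '] else out) ++ [p.2]

def fmt_hex_py_alt (s : String) : String :=
  String.ofList
    (((PySem.List.enumerate (PySem.Chars.upper s.toList).reverse 0).foldl fmtBStep []).reverse)

-- ===== PRECONDITION & SPEC =====
def Spec_fmt_hex_py (s : String) (out : String) : Prop := out = fmt_hex_py_alt s
instance (s : String) (out : String) : Decidable (Spec_fmt_hex_py s out) := by unfold Spec_fmt_hex_py; infer_instance

-- ===== CLAIM (what is proved, stated in full; the proofs are below) =====
def Claim_equal_fmt_hex_py : Prop := ∀ (s : String), Dom_fmt_hex_py s → Spec_fmt_hex_py s (fmt_hex_py s)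

-- ===== LEMMAS AND PROOFS =====

-- canonical grouping of the REVERSED string into 4-chunks from the front
def chunk4 (r : List Char) : List (List Char) :=
  if r.length ≤ 4 then [r] else r.take 4 :: chunk4 (r.drop 4)
termination_by r.length
decreasing_by simp; omega

lemma chunk4_ne_nil (r : List Char) : chunk4 r ≠ [] := by
  unfold chunk4; split <;> simp

-- A's loop produces the reversed 4-chunks of the reversed string, each chunk reversed
lemma fmtALoop_eq (cs : List Char) (groups : List (List Char)) :
    fmtALoop cs groups = groups ++ (chunk4 cs.reverse).map List.reverse := by
  induction cs, groups using fmtALoop.induct with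
  | case1 cs groups h IH =>
    rw [fmtALoop, if_pos h, IH]
    have h4 : cs.length - (cs.length - 4) = 4 := by omega
    have hs1 : PySem.Chars.slice cs none (some (-4)) = cs.take (cs.length - 4) := by
      simp [PySem.List.slice_to_neg_ofNat cs 4 (by omega)]
    have hs2 : PySem.Chars.slice cs (some (-4)) none = cs.drop (cs.length - 4) := by
      simp [PySem.List.slice_from_neg_ofNat cs 4 (by omega)]
    rw [hs1, hs2]
    have key : chunk4 cs.reverse
        = (cs.drop (cs.length - 4)).reverse :: chunk4 (cs.take (cs.length - 4)).reverse := by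
      rw [chunk4, if_neg (by simp; omega)]
      congr 1
      · rw [List.reverse_drop, h4]
      · congr 1
        rw [List.reverse_take, h4]
    rw [key]
    simp
  | case2 cs groups h =>
    rw [fmtALoop, if_neg h, chunk4, if_pos (by simp; omega)]
    simp

-- B's fold as a structural recursion on the remaining characters
def tailJoin : Int → List Char → List Char
  | _, [] => []
  | n, c :: cs => (if n % 4 = 0 ∧ 0 < n then [' '] else []) ++ c :: tailJoin (n + 1) cs

lemma foldl_fmtBStep (r : List Char) (n : Int) (out : List Char) :
    (PySem.List.enumerate r n).foldl fmtBStep out = out ++ tailJoin n r := by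
  induction r generalizing n out with
  | nil => simp [tailJoin]
  | cons c cs IH =>
    rw [PySem.List.enumerate_cons]
    simp only [List.foldl_cons, IH, tailJoin, fmtBStep]
    split <;> simp

lemma tailJoin_no_space (r : List Char) (n : Int)
    (h : ∀ j : Nat, j < r.length → (n + j) % 4 ≠ 0) : tailJoin n r = r := by
  induction r generalizing n with
  | nil => rfl
  | cons c cs IH =>
    have h0 : n % 4 ≠ 0 := by have := h 0 (by simp); simpa using this
    rw [tailJoin, if_neg (by tauto)]
    simp only [List.nil_append, List.cons.injEq, true_and]
    exact IH (n + 1) (fun j hj => by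
      have := h (j + 1) (by simpa using Nat.succ_lt_succ hj)
      push_cast at this ⊢
      omega)

lemma tailJoin_eq_join (r : List Char) (hr : r ≠ []) (m : Nat) :
    tailJoin (4 * (m : Int)) r
      = (if 0 < m then [' '] else []) ++ PySem.Chars.join [' '] (chunk4 r) := by
  induction hn : r.length using Nat.strong_induction_on generalizing r m with
  | _ n IH =>
  subst hn
  by_cases hle : r.length ≤ 4
  · obtain ⟨c, cs, rfl⟩ := List.exists_cons_of_ne_nil hr
    rw [chunk4, if_pos hle, PySem.Chars.join_singleton, tailJoin]
    have hcs : tailJoin (4 * (m : Int) + 1) cs = cs := by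
      apply tailJoin_no_space
      intro j hj
      simp only [List.length_cons] at hle
      omega
    rw [hcs]
    by_cases hm : 0 < m
    · rw [if_pos (show 4 * (m : Int) % 4 = 0 ∧ 0 < 4 * (m : Int) from ⟨by omega, by omega⟩),
        if_pos hm]
    · rw [if_neg (show ¬(4 * (m : Int) % 4 = 0 ∧ 0 < 4 * (m : Int)) by omega), if_neg hm]
  · have hlen : 4 < r.length := by omega
    obtain ⟨a, r1, rfl⟩ := List.exists_cons_of_ne_nil hr
    obtain ⟨b, r2, rfl⟩ := List.exists_cons_of_ne_nil
      (show r1 ≠ [] by rintro rfl; simp only [List.length_cons, List.length_nil] at hlen; omega)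
    obtain ⟨c, r3, rfl⟩ := List.exists_cons_of_ne_nil
      (show r2 ≠ [] by rintro rfl; simp only [List.length_cons, List.length_nil] at hlen; omega)
    obtain ⟨d, rest, rfl⟩ := List.exists_cons_of_ne_nil
      (show r3 ≠ [] by rintro rfl; simp only [List.length_cons, List.length_nil] at hlen; omega)
    have hrest : rest ≠ [] := by
      rintro rfl; simp only [List.length_cons, List.length_nil] at hlen; omega
    have c2 : ¬((4 * (m : Int) + 1) % 4 = 0 ∧ 0 < 4 * (m : Int) + 1) := by omega
    have c3 : ¬((4 * (m : Int) + 1 + 1) % 4 = 0 ∧ 0 < 4 * (m : Int) + 1 + 1) := by omega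
    have c4 : ¬((4 * (m : Int) + 1 + 1 + 1) % 4 = 0 ∧ 0 < 4 * (m : Int) + 1 + 1 + 1) := by
      omega
    simp only [tailJoin, if_neg c2, if_neg c3, if_neg c4]
    have e5 : 4 * (m : Int) + 1 + 1 + 1 + 1 = 4 * ((m + 1 : Nat) : Int) := by
      push_cast; ring
    have hlt : rest.length < (a :: b :: c :: d :: rest).length := by
      simp only [List.length_cons]; omega
    have hIH := IH rest.length hlt rest hrest (m + 1) rfl
    rw [e5, hIH]
    have hcond : ¬((a :: b :: c :: d :: rest).length ≤ 4) := Nat.not_le.mpr hlen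
    have hch : chunk4 (a :: b :: c :: d :: rest) = [a, b, c, d] :: chunk4 rest := by
      rw [chunk4, if_neg hcond]; rfl
    obtain ⟨q, qs, hq⟩ := List.exists_cons_of_ne_nil (chunk4_ne_nil rest)
    rw [hch, hq, PySem.Chars.join_cons_cons, ← hq]
    by_cases hm : 0 < m
    · rw [if_pos (show 4 * (m : Int) % 4 = 0 ∧ 0 < 4 * (m : Int) from ⟨by omega, by omega⟩),
        if_pos hm, if_pos (show 0 < m + 1 by omega)]
      simp
    · rw [if_neg (show ¬(4 * (m : Int) % 4 = 0 ∧ 0 < 4 * (m : Int)) by omega), if_neg hm,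
        if_pos (show 0 < m + 1 by omega)]
      simp

lemma join_append_singleton (sep : List Char) (xs : List (List Char)) (y : List Char)
    (hxs : xs ≠ []) :
    PySem.Chars.join sep (xs ++ [y]) = PySem.Chars.join sep xs ++ sep ++ y := by
  induction xs with
  | nil => exact absurd rfl hxs
  | cons x xs IH =>
    cases xs with
    | nil => simp [PySem.Chars.join_cons_cons, PySem.Chars.join_singleton]
    | cons z zs =>
      rw [List.cons_append, List.cons_append, PySem.Chars.join_cons_cons,
        ← List.cons_append, IH (by simp), PySem.Chars.join_cons_cons]
      simp

lemma join_reverse (parts : List (List Char)) :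
    (PySem.Chars.join [' '] parts).reverse
      = PySem.Chars.join [' '] ((parts.map List.reverse).reverse) := by
  induction parts with
  | nil => simp [PySem.Chars.join_nil]
  | cons p ps IH =>
    cases ps with
    | nil => simp [PySem.Chars.join_singleton]
    | cons q qs =>
      rw [PySem.Chars.join_cons_cons]
      have h1 : ((p :: q :: qs).map List.reverse).reverse
          = ((q :: qs).map List.reverse).reverse ++ [p.reverse] := by simp
      rw [h1, join_append_singleton _ _ _ (by simp), ← IH]
      simp

-- ===== VERDICT (by name: the statement is the Claim_ definition above) =====
theorem fmt_hex_py_spec : Claim_equal_fmt_hex_py := by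
  intro s _
  unfold Spec_fmt_hex_py fmt_hex_py fmt_hex_py_alt
  rw [fmtALoop_eq, foldl_fmtBStep]
  simp only [List.nil_append]
  by_cases h : (PySem.Chars.upper s.toList).reverse = []
  · rw [h]
    rw [show tailJoin 0 ([] : List Char) = [] from rfl, chunk4]
    simp [PySem.Chars.join_singleton]
  · have h0 : (0 : Int) = 4 * ((0 : Nat) : Int) := by norm_num
    rw [h0, tailJoin_eq_join _ h 0, if_neg (by omega)]
    rw [List.nil_append, join_reverse]
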